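-- pv_equiv track=rewrite | github.com/ZDCSlab/Group-Adaptive-Elicitation | src/inference/utils_llm.py | options_to_string
-- ===== SOURCE A (Python) =====
-- def options_to_string(options: dict, prefix="Options: ", sep=", "):
--     """
--     Render {"1":"Yes","2":"No"} -> "Options: [1] Yes, [2] No"
--     Sorts numerically if possible, else lexicographically.
--     """
--     def try_int(s):
--         try: return int(s)
--         except: return None
--
--     # Normalize keys to strings for display, but sort by numeric value if possible
--     items = []
--     for k, v in options.items():
--         ks = str(k).strip()
--         kn = try_int(ks)
--         items.append((ks, v, (0, kn) if kn is not None else (1, ks)))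
--     items.sort(key=lambda x: x[2])
--
--     body = sep.join(f"[{ks}] {v}" for ks, v, _ in items)
--     return f"{prefix}{body}"
-- ===== SOURCE B (Python) =====
-- def options_to_string(options: dict, prefix="Options: ", sep=", "):
--     """
--     Render {"1":"Yes","2":"No"} -> "Options: [1] Yes, [2] No"
--     Partition keys into numeric and textual, sort each group separately
--     (stably), and emit numeric keys first.
--     """
--     numeric, text = [], []
--     for k, v in options.items():
--         ks = str(k).strip()
--         try:
--             numeric.append((int(ks), ks, v))
--         except:
--             text.append((ks, v))
--     numeric.sort(key=lambda t: t[0])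
--     text.sort(key=lambda t: t[0])
--     parts = [f"[{ks}] {v}" for _, ks, v in numeric]
--     parts += [f"[{ks}] {v}" for ks, v in text]
--     return prefix + sep.join(parts)
-- ===== Notes on version B (the rewrite author's own statement) =====
-- stated objective: alternative
-- what changed: Replaces A's single stable sort under a composite (tag, numeric-or-string) key by a one-pass partition into numeric and textual keys followed by one plain stable sort per group, concatenated numeric-first.
import Mathlib
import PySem

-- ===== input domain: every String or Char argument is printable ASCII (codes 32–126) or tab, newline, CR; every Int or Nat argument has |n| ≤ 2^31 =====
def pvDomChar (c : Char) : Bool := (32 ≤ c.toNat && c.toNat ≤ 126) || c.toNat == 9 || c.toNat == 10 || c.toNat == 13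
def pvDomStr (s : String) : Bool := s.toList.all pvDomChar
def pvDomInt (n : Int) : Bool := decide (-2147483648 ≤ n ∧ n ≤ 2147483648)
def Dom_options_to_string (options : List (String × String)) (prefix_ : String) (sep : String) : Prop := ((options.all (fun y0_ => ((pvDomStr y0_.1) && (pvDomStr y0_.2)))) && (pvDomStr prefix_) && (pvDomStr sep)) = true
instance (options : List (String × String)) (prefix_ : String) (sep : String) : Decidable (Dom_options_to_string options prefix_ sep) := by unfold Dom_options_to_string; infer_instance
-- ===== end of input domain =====

-- B replaces A's single stable sort under a composite (tag, key) sort key by a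
-- partition into numeric and textual keys with one plain stable sort per group
-- (objective: alternative decomposition, same cost).

-- f"[{ks}] {v}" (identical in both Pythons)
def pvFmt (ks v : String) : String := PySem.Str.join "" ["[", ks, "] ", v]

-- ===== PORT A =====
-- A's sort key '(0, kn) if kn is not None else (1, ks)': numeric keys tagged
-- below textual ones; Sum.inl = (0, kn), Sum.inr = (1, ks).
def pvKeyA (ks : String) : Sum Int String :=
  match PySem.Int.ofStr? ks with
  | some n => Sum.inl n
  | none => Sum.inr ks

-- Python's '<' on those tuple keys (first components 0/1 decide unless equal)
def pvKeyLT : Sum Int String → Sum Int String → Bool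
  | Sum.inl a, Sum.inl b => decide (a < b)
  | Sum.inl _, Sum.inr _ => true
  | Sum.inr _, Sum.inl _ => false
  | Sum.inr a, Sum.inr b => decide (a < b)

def options_to_string (options : List (String × String)) (prefix_ : String) (sep : String) : String :=
  -- for k, v in options.items(): items.append((ks, v, key))
  let items := options.foldl
    (fun (acc : List (String × String × Sum Int String)) kv =>
      let ks := PySem.Str.strip kv.1
      acc ++ [(ks, kv.2, pvKeyA ks)]) []
  -- items.sort(key=lambda x: x[2]) — stable insertion sort, the rfl form of
  -- PySem.List.sorted, with the composite-key comparison written out (exact)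
  let sortedItems := items.foldl
    (fun acc x => PySem.List.insertBy (fun a b => pvKeyLT a.2.2 b.2.2) x acc) []
  let body := PySem.Str.join sep (sortedItems.map (fun x => pvFmt x.1 x.2.1))
  PySem.Str.join "" [prefix_, body]

-- ===== PORT B =====
def options_to_string_alt (options : List (String × String)) (prefix_ : String) (sep : String) : String :=
  -- one pass: numeric.append((int(ks), ks, v)) / text.append((ks, v))
  let nt := options.foldl
    (fun (acc : List (Int × String × String) × List (String × String)) kv =>
      let ks := PySem.Str.strip kv.1
      match PySem.Int.ofStr? ks with
      | some n => (acc.1 ++ [(n, ks, kv.2)], acc.2)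
      | none => (acc.1, acc.2 ++ [(ks, kv.2)])) ([], [])
  let numeric := PySem.List.sorted nt.1 (fun t => t.1)
  let text := PySem.List.sorted nt.2 (fun t => t.1)
  let parts := numeric.map (fun t => pvFmt t.2.1 t.2.2) ++ text.map (fun t => pvFmt t.1 t.2)
  PySem.Str.join "" [prefix_, PySem.Str.join sep parts]

-- ===== PRECONDITION & SPEC =====
def Spec_options_to_string (options : List (String × String)) (prefix_ : String) (sep : String) (out : String) : Prop := out = options_to_string_alt options prefix_ sep
instance (options : List (String × String)) (prefix_ : String) (sep : String) (out : String) : Decidable (Spec_options_to_string options prefix_ sep out) := by unfold Spec_options_to_string; infer_instance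

-- ===== CLAIM (what is proved, stated in full; the proofs are below) =====
def Claim_equal_options_to_string : Prop := ∀ (options : List (String × String)) (prefix_ : String) (sep : String), Dom_options_to_string options prefix_ sep → Spec_options_to_string options prefix_ sep (options_to_string options prefix_ sep)

-- ===== LEMMAS AND PROOFS =====

-- A's item for one (k, v) pair
def pvItemOf (kv : String × String) : String × String × Sum Int String :=
  (PySem.Str.strip kv.1, kv.2, pvKeyA (PySem.Str.strip kv.1))

def pvIsNum (x : String × String × Sum Int String) : Bool := x.2.2.isLeft

-- B's numeric / textual sublists, as filterMaps of the input
def pvNumOf (l : List (String × String)) : List (Int × String × String) :=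
  l.filterMap (fun kv =>
    match PySem.Int.ofStr? (PySem.Str.strip kv.1) with
    | some n => some (n, PySem.Str.strip kv.1, kv.2)
    | none => none)

def pvTxtOf (l : List (String × String)) : List (String × String) :=
  l.filterMap (fun kv =>
    match PySem.Int.ofStr? (PySem.Str.strip kv.1) with
    | some _ => none
    | none => some (PySem.Str.strip kv.1, kv.2))

def pvEmbN (t : Int × String × String) : String × String × Sum Int String :=
  (t.2.1, t.2.2, Sum.inl t.1)

def pvEmbT (t : String × String) : String × String × Sum Int String :=
  (t.1, t.2, Sum.inr t.1)

theorem pv_foldl_append_map {α β : Type} (g : α → β) (l : List α) (acc : List β) :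
    l.foldl (fun a x => a ++ [g x]) acc = acc ++ l.map g := by
  induction l generalizing acc with
  | nil => simp
  | cons x t ih => simp [List.foldl, ih]

theorem pv_buildB (l : List (String × String)) (a : List (Int × String × String)) (b : List (String × String)) :
    l.foldl (fun (acc : List (Int × String × String) × List (String × String)) kv =>
      let ks := PySem.Str.strip kv.1
      match PySem.Int.ofStr? ks with
      | some n => (acc.1 ++ [(n, ks, kv.2)], acc.2)
      | none => (acc.1, acc.2 ++ [(ks, kv.2)])) (a, b)
    = (a ++ pvNumOf l, b ++ pvTxtOf l) := by
  induction l generalizing a b with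
  | nil => simp [pvNumOf, pvTxtOf]
  | cons kv t ih =>
    simp only [List.foldl]
    cases h : PySem.Int.ofStr? (PySem.Str.strip kv.1) with
    | some n => simp [h, ih, pvNumOf, pvTxtOf]
    | none => simp [h, ih, pvNumOf, pvTxtOf]

theorem pv_filter_num (l : List (String × String)) :
    (l.map pvItemOf).filter pvIsNum = (pvNumOf l).map pvEmbN := by
  induction l with
  | nil => simp [pvNumOf]
  | cons kv t ih =>
    cases h : PySem.Int.ofStr? (PySem.Str.strip kv.1) with
    | some n =>
      simp [pvNumOf, pvItemOf, pvKeyA, pvIsNum, pvEmbN, h, List.filter] at *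
      simpa [pvNumOf] using ih
    | none =>
      simp [pvNumOf, pvItemOf, pvKeyA, pvIsNum, pvEmbN, h, List.filter] at *
      simpa [pvNumOf] using ih

theorem pv_filter_txt (l : List (String × String)) :
    (l.map pvItemOf).filter (fun x => !pvIsNum x) = (pvTxtOf l).map pvEmbT := by
  induction l with
  | nil => simp [pvTxtOf]
  | cons kv t ih =>
    cases h : PySem.Int.ofStr? (PySem.Str.strip kv.1) with
    | some n =>
      simp [pvTxtOf, pvItemOf, pvKeyA, pvIsNum, pvEmbT, h, List.filter] at *
      simpa [pvTxtOf] using ih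
    | none =>
      simp [pvTxtOf, pvItemOf, pvKeyA, pvIsNum, pvEmbT, h, List.filter] at *
      simpa [pvTxtOf] using ih

theorem pv_insertBy_append_left {α : Type} (before : α → α → Bool) (x : α) (as bs : List α)
    (h : ∀ b ∈ bs, before x b = true) :
    PySem.List.insertBy before x (as ++ bs) = PySem.List.insertBy before x as ++ bs := by
  induction as with
  | nil =>
    cases bs with
    | nil => simp [PySem.List.insertBy]
    | cons b bs' => simp [PySem.List.insertBy, h b (by simp)]
  | cons a as' ih =>
    by_cases hx : before x a = true
    · simp [PySem.List.insertBy, hx]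
    · simp [PySem.List.insertBy, hx, ih]

theorem pv_insertBy_append_right {α : Type} (before : α → α → Bool) (x : α) (as bs : List α)
    (h : ∀ a ∈ as, before x a = false) :
    PySem.List.insertBy before x (as ++ bs) = as ++ PySem.List.insertBy before x bs := by
  induction as with
  | nil => simp
  | cons a as' ih =>
    have := h a (by simp)
    simp only [List.cons_append, PySem.List.insertBy, this]
    simp only [Bool.false_eq_true, if_false]
    rw [ih (fun a' ha' => h a' (by simp [ha']))]

theorem pv_foldl_split {α : Type} (before : α → α → Bool) (p : α → Bool)
    (hcross₁ : ∀ x y, p x = true → p y = false → before x y = true)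
    (hcross₂ : ∀ x y, p x = false → p y = true → before x y = false)
    (l na ta : List α) (hna : ∀ a ∈ na, p a = true) (hta : ∀ b ∈ ta, p b = false) :
    l.foldl (fun acc x => PySem.List.insertBy before x acc) (na ++ ta)
      = (l.filter p).foldl (fun acc x => PySem.List.insertBy before x acc) na
        ++ (l.filter (fun x => !p x)).foldl (fun acc x => PySem.List.insertBy before x acc) ta := by
  induction l generalizing na ta with
  | nil => simp
  | cons x t ih =>
    by_cases hx : p x = true
    · have h1 : PySem.List.insertBy before x (na ++ ta) = PySem.List.insertBy before x na ++ ta :=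
        pv_insertBy_append_left before x na ta (fun b hb => hcross₁ x b hx (hta b hb))
      have hna' : ∀ a ∈ PySem.List.insertBy before x na, p a = true := by
        intro a ha
        rcases (PySem.List.mem_insertBy before x a na).1 ha with h | h
        · subst h; exact hx
        · exact hna a h
      simp only [List.foldl, h1, List.filter, hx]
      rw [ih _ _ hna' hta]
      simp
    · have hx' : p x = false := by simpa using hx
      have h1 : PySem.List.insertBy before x (na ++ ta) = na ++ PySem.List.insertBy before x ta :=
        pv_insertBy_append_right before x na ta (fun a ha => hcross₂ x a hx' (hna a ha))
      have hta' : ∀ b ∈ PySem.List.insertBy before x ta, p b = false := by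
        intro b hb
        rcases (PySem.List.mem_insertBy before x b ta).1 hb with h | h
        · subst h; exact hx'
        · exact hta b h
      simp only [List.foldl, h1, List.filter, hx']
      rw [ih _ _ hna hta']
      simp [List.foldl]

theorem pv_insertBy_map {α β : Type} (f : α → β) (b₂ : β → β → Bool) (b₁ : α → α → Bool)
    (h : ∀ x y, b₂ (f x) (f y) = b₁ x y) (x : α) (ys : List α) :
    PySem.List.insertBy b₂ (f x) (ys.map f) = (PySem.List.insertBy b₁ x ys).map f := by
  induction ys with
  | nil => simp [PySem.List.insertBy]
  | cons y t ih =>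
    by_cases hx : b₁ x y = true
    · simp [PySem.List.insertBy, h, hx]
    · simp [PySem.List.insertBy, h, hx, ih]

theorem pv_foldl_insertBy_map {α β : Type} (f : α → β) (b₂ : β → β → Bool) (b₁ : α → α → Bool)
    (h : ∀ x y, b₂ (f x) (f y) = b₁ x y) (l : List α) (acc : List α) :
    (l.map f).foldl (fun acc x => PySem.List.insertBy b₂ x acc) (acc.map f)
      = (l.foldl (fun acc x => PySem.List.insertBy b₁ x acc) acc).map f := by
  induction l generalizing acc with
  | nil => simp
  | cons x t ih =>
    simp only [List.map, List.foldl]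
    rw [pv_insertBy_map f b₂ b₁ h x acc, ih]

-- ===== VERDICT (by name: the statement is the Claim_ definition above) =====
theorem options_to_string_spec : Claim_equal_options_to_string := by
  intro options prefix_ sep _
  unfold Spec_options_to_string options_to_string options_to_string_alt
  simp only [pv_foldl_append_map, List.nil_append, pv_buildB]
  have hsplit := pv_foldl_split (fun a b => pvKeyLT a.2.2 b.2.2) pvIsNum
    (by rintro ⟨_, _, kx⟩ ⟨_, _, ky⟩ hx hy
        cases kx <;> cases ky <;> simp [pvIsNum, pvKeyLT] at *)
    (by rintro ⟨_, _, kx⟩ ⟨_, _, ky⟩ hx hy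
        cases kx <;> cases ky <;> simp [pvIsNum, pvKeyLT] at *)
    (options.map pvItemOf) [] [] (by simp) (by simp)
  simp only [List.nil_append] at hsplit
  have hnum : List.foldl (fun acc x => PySem.List.insertBy (fun a b => pvKeyLT a.2.2 b.2.2) x acc) []
      (List.map pvEmbN (pvNumOf options))
      = List.map pvEmbN (PySem.List.sorted (pvNumOf options) (fun t => t.1)) := by
    rw [PySem.List.sorted_eq_foldl_insertBy]
    simpa using pv_foldl_insertBy_map pvEmbN _ (fun a b => decide (a.1 < b.1))
      (by intro x y; simp [pvEmbN, pvKeyLT]) (pvNumOf options) []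
  have htxt : List.foldl (fun acc x => PySem.List.insertBy (fun a b => pvKeyLT a.2.2 b.2.2) x acc) []
      (List.map pvEmbT (pvTxtOf options))
      = List.map pvEmbT (PySem.List.sorted (pvTxtOf options) (fun t => t.1)) := by
    rw [PySem.List.sorted_eq_foldl_insertBy]
    simpa using pv_foldl_insertBy_map pvEmbT _ (fun a b => decide (a.1 < b.1))
      (by intro x y; simp [pvEmbT, pvKeyLT]) (pvTxtOf options) []
  rw [show (fun (x : String × String) => (PySem.Str.strip x.1, x.2, pvKeyA (PySem.Str.strip x.1))) = pvItemOf from rfl]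
  rw [hsplit, pv_filter_num, pv_filter_txt, hnum, htxt]
  simp [List.map_append, Function.comp_def, pvEmbN, pvEmbT]
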